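-- pv_equiv track=rewrite | github.com/decaf12/advent-of-code | 2024/21/a.py | calc_directions
-- ===== SOURCE A (Python) =====
-- from typing import Counter, Dict, List, Tuple
--
-- ACTION = 'A'
--
-- FORBIDDEN = '#'
--
-- N = '^'
--
-- S = 'v'
--
-- W = '<'
--
-- E = '>'
--
-- def calc_directions(instruction1: str, instruction2: str, keypad: List[List[str]], keypad_lookup: Dict[str, Tuple[int, int]]):
--     row1, col1 = keypad_lookup[instruction1]
--     row2, col2 = keypad_lookup[instruction2]
--     abs_d_row = abs(row1 - row2)
--     abs_d_col = abs(col1 - col2)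
--     can_move_vertically_first = (keypad[row2][col1] != FORBIDDEN)
--     can_move_horizontally_first = (keypad[row1][col2] != FORBIDDEN)
--     directions = []
--     if col2 == col1:
--         # N
--         if row2 < row1:
--             directions = [N * abs_d_row]
--         # S
--         elif row2 > row1:
--             directions = [S * abs_d_row]
--         # None
--         else:
--             directions = ['']
--     elif col2 > col1:
--         # NE
--         if row2 < row1:
--             if can_move_vertically_first:
--                 directions.append(N * abs_d_row + E * abs_d_col)
--             if can_move_horizontally_first:
--                 directions.append(E * abs_d_col + N * abs_d_row)
--         # SE
--         elif row2 > row1: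
--             if can_move_vertically_first:
--                 directions.append(S * abs_d_row + E * abs_d_col)
--             if can_move_horizontally_first:
--                 directions.append(E * abs_d_col + S * abs_d_row)
--         # E
--         else:
--             directions = [E * abs_d_col]
--     else:
--         # NW
--         if row2 < row1:
--             if can_move_vertically_first:
--                 directions.append(N * abs_d_row + W * abs_d_col)
--             if can_move_horizontally_first:
--                 directions.append(W * abs_d_col + N * abs_d_row)
--         # SW
--         elif row2 > row1:
--             if can_move_vertically_first:
--                 directions.append(S * abs_d_row + W * abs_d_col)
--             if can_move_horizontally_first:
--                 directions.append(W * abs_d_col + S * abs_d_row)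
--         # W
--         else:
--             directions = [W * abs_d_col]
--     return [f"{direction}{ACTION}" for direction in directions]
-- ===== SOURCE B (Python) =====
-- ACTION = 'A'
-- FORBIDDEN = '#'
--
-- def calc_directions(instruction1, instruction2, keypad, keypad_lookup):
--     r1, c1 = keypad_lookup[instruction1]
--     r2, c2 = keypad_lookup[instruction2]
--
--     def walk(vertical_first):
--         # walk one cell at a time toward the target, preferred axis first
--         r, c, path = r1, c1, []
--         while (r, c) != (r2, c2):
--             if (vertical_first and r != r2) or (not vertical_first and c == c2):
--                 path.append('^' if r2 < r else 'v')
--                 r += 1 if r2 > r else -1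
--             else:
--                 path.append('>' if c2 > c else '<')
--                 c += 1 if c2 > c else -1
--         return ''.join(path)
--
--     vert_first_ok = keypad[r2][c1] != FORBIDDEN
--     horiz_first_ok = keypad[r1][c2] != FORBIDDEN
--     p_vert = walk(True)
--     p_horiz = walk(False)
--     if p_vert == p_horiz:
--         return [p_vert + ACTION]
--     result = []
--     if vert_first_ok:
--         result.append(p_vert)
--     if horiz_first_ok:
--         result.append(p_horiz)
--     return [p + ACTION for p in result]
-- ===== Notes on version B (the rewrite author's own statement) =====
-- stated objective: alternative
-- what changed: Replaces A's nine-branch sign-case analysis built from string multiplication with a cell-by-cell walker that steps toward the target one key at a time (preferred axis first), run once per axis preference; the two walked paths are deduplicated by comparison instead of A's explicit single-axis branches.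
import Mathlib
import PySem

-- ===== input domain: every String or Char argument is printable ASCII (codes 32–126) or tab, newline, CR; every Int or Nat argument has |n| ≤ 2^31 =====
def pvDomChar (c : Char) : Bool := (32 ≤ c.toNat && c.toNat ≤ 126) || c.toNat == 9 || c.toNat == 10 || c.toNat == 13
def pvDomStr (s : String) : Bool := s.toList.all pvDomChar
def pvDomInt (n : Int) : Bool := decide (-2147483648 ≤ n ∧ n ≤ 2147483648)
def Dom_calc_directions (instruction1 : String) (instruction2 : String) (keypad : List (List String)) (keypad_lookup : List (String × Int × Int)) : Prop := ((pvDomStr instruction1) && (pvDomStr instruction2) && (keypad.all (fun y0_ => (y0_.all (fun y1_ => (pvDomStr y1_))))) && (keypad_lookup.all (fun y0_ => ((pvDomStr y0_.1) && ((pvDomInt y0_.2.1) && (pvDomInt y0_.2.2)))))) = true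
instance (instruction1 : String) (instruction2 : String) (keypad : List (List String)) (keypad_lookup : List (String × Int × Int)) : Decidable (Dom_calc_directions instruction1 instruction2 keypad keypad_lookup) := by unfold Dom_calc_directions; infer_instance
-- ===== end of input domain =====

-- ===== PORT A =====
-- B replaces A's nine sign-case branches by a single cell-by-cell walker run with each
-- axis preference (objective: alternative, same cost). Neither program mutates arguments.
def pvStrTimesA (c : Char) (n : Int) : String := String.ofList (List.replicate n.toNat c)

def pvCellA (keypad : List (List String)) (r : Int) (c : Int) : Option String :=
  (PySem.List.pyGet? keypad r).bind (fun row => PySem.List.pyGet? row c)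

def calc_directions (instruction1 : String) (instruction2 : String) (keypad : List (List String)) (keypad_lookup : List (String × Int × Int)) : List String :=
  match List.lookup instruction1 keypad_lookup, List.lookup instruction2 keypad_lookup with
  | some (row1, col1), some (row2, col2) =>
    let abs_d_row : Int := |row1 - row2|
    let abs_d_col : Int := |col1 - col2|
    let can_move_vertically_first : Bool := pvCellA keypad row2 col1 != some "#"
    let can_move_horizontally_first : Bool := pvCellA keypad row1 col2 != some "#"
    let directions : List String :=
      if col2 = col1 then
        if row2 < row1 then [pvStrTimesA '^' abs_d_row]
        else if row2 > row1 then [pvStrTimesA 'v' abs_d_row]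
        else [""]
      else if col2 > col1 then
        if row2 < row1 then
          (if can_move_vertically_first then [pvStrTimesA '^' abs_d_row ++ pvStrTimesA '>' abs_d_col] else []) ++
          (if can_move_horizontally_first then [pvStrTimesA '>' abs_d_col ++ pvStrTimesA '^' abs_d_row] else [])
        else if row2 > row1 then
          (if can_move_vertically_first then [pvStrTimesA 'v' abs_d_row ++ pvStrTimesA '>' abs_d_col] else []) ++
          (if can_move_horizontally_first then [pvStrTimesA '>' abs_d_col ++ pvStrTimesA 'v' abs_d_row] else [])
        else [pvStrTimesA '>' abs_d_col]
      else
        if row2 < row1 then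
          (if can_move_vertically_first then [pvStrTimesA '^' abs_d_row ++ pvStrTimesA '<' abs_d_col] else []) ++
          (if can_move_horizontally_first then [pvStrTimesA '<' abs_d_col ++ pvStrTimesA '^' abs_d_row] else [])
        else if row2 > row1 then
          (if can_move_vertically_first then [pvStrTimesA 'v' abs_d_row ++ pvStrTimesA '<' abs_d_col] else []) ++
          (if can_move_horizontally_first then [pvStrTimesA '<' abs_d_col ++ pvStrTimesA 'v' abs_d_row] else [])
        else [pvStrTimesA '<' abs_d_col]
    directions.map (fun d => d ++ "A")
  | _, _ => []   -- KeyError in Python; excluded by Pre_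

-- ===== PORT B =====
-- B's walker: step one cell at a time toward the target, preferred axis first,
-- emitting one direction character per step (transcribes Source B's `walk`).
def pvWalk (r2 c2 : Int) (vfirst : Bool) : Nat → Int → Int → List Char
  | 0, _, _ => []   -- fuel guard only; the callers pass enough fuel for the loop to finish
  | fuel + 1, r, c =>
    if r = r2 ∧ c = c2 then []
    else if (vfirst = true ∧ r ≠ r2) ∨ (vfirst = false ∧ c = c2) then
      (if r2 < r then '^' else 'v') :: pvWalk r2 c2 vfirst fuel (if r2 > r then r + 1 else r - 1) c
    else
      (if c2 > c then '>' else '<') :: pvWalk r2 c2 vfirst fuel r (if c2 > c then c + 1 else c - 1)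

def calc_directions_alt (instruction1 : String) (instruction2 : String) (keypad : List (List String)) (keypad_lookup : List (String × Int × Int)) : List String :=
  match List.lookup instruction1 keypad_lookup with
  | none => []   -- KeyError in Python; excluded by Pre_
  | some (r1, c1) =>
    match List.lookup instruction2 keypad_lookup with
    | none => []   -- KeyError in Python; excluded by Pre_
    | some (r2, c2) =>
      let vert_first_ok : Bool := ((PySem.List.pyGet? keypad r2).bind (fun row => PySem.List.pyGet? row c1)) != some "#"
      let horiz_first_ok : Bool := ((PySem.List.pyGet? keypad r1).bind (fun row => PySem.List.pyGet? row c2)) != some "#"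
      let fuel : Nat := (r2 - r1).natAbs + (c2 - c1).natAbs
      let p_vert : String := String.ofList (pvWalk r2 c2 true fuel r1 c1)
      let p_horiz : String := String.ofList (pvWalk r2 c2 false fuel r1 c1)
      if p_vert = p_horiz then [p_vert ++ "A"]
      else
        ((if vert_first_ok then [p_vert] else []) ++
         (if horiz_first_ok then [p_horiz] else [])).map (fun p => p ++ "A")

-- ===== PRECONDITION & SPEC =====
-- Pre_ excludes exactly the inputs where Python A raises: a KeyError when an instruction is
-- missing from the lookup, or an IndexError when one of the two keypad cells A inspects is
-- out of range (Python negative in-range indices are admitted; pyGet? wraps like Python).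
def Pre_calc_directions (instruction1 : String) (instruction2 : String) (keypad : List (List String)) (keypad_lookup : List (String × Int × Int)) : Prop :=
  (List.lookup instruction1 keypad_lookup).elim False (fun p1 =>
    (List.lookup instruction2 keypad_lookup).elim False (fun p2 =>
      ((PySem.List.pyGet? keypad p2.1).bind (fun row => PySem.List.pyGet? row p1.2)).isSome = true ∧
      ((PySem.List.pyGet? keypad p1.1).bind (fun row => PySem.List.pyGet? row p2.2)).isSome = true))

instance (instruction1 : String) (instruction2 : String) (keypad : List (List String)) (keypad_lookup : List (String × Int × Int)) : Decidable (Pre_calc_directions instruction1 instruction2 keypad keypad_lookup) := by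
  unfold Pre_calc_directions
  rcases List.lookup instruction1 keypad_lookup with _ | ⟨r1, c1⟩
  all_goals rcases List.lookup instruction2 keypad_lookup with _ | ⟨r2, c2⟩
  all_goals simp only [Option.elim]
  all_goals infer_instance

def pvWitness_calc_directions : String × String × List (List String) × (List (String × Int × Int)) :=
  ("1", "2", [["1", "2"], ["3", "#"]], [("1", (0, 0)), ("2", (0, 1)), ("3", (1, 0))])

def Spec_calc_directions (instruction1 : String) (instruction2 : String) (keypad : List (List String)) (keypad_lookup : List (String × Int × Int)) (out : List String) : Prop := out = calc_directions_alt instruction1 instruction2 keypad keypad_lookup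
instance (instruction1 : String) (instruction2 : String) (keypad : List (List String)) (keypad_lookup : List (String × Int × Int)) (out : List String) : Decidable (Spec_calc_directions instruction1 instruction2 keypad keypad_lookup out) := by unfold Spec_calc_directions; infer_instance

-- ===== CLAIM (what is proved, stated in full; the proofs are below) =====
def Claim_equal_calc_directions : Prop := ∀ (instruction1 : String) (instruction2 : String) (keypad : List (List String)) (keypad_lookup : List (String × Int × Int)), Dom_calc_directions instruction1 instruction2 keypad keypad_lookup → Pre_calc_directions instruction1 instruction2 keypad keypad_lookup → Spec_calc_directions instruction1 instruction2 keypad keypad_lookup (calc_directions instruction1 instruction2 keypad keypad_lookup)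

-- ===== LEMMAS AND PROOFS =====
theorem replicate_congr_char (m : ℕ) (x y : Char) (h : m ≠ 0 → x = y) :
    List.replicate m x = List.replicate m y := by
  cases m with
  | zero => rfl
  | succ k => rw [h k.succ_ne_zero]

-- Closed form of the walker, given enough fuel: the preferred axis comes out as one run,
-- then the other axis.
theorem pvWalk_true_eq (r2 c2 : Int) : ∀ (fuel : ℕ) (r c : Int),
    (r2 - r).natAbs + (c2 - c).natAbs ≤ fuel →
    pvWalk r2 c2 true fuel r c =
      List.replicate (r2 - r).natAbs (if r2 < r then '^' else 'v') ++
      List.replicate (c2 - c).natAbs (if c2 > c then '>' else '<') := by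
  intro fuel
  induction fuel with
  | zero =>
    intro r c h
    have h1 : (r2 - r).natAbs = 0 := by omega
    have h2 : (c2 - c).natAbs = 0 := by omega
    simp [pvWalk, h1, h2]
  | succ k ih =>
    intro r c h
    by_cases hrc : r = r2 ∧ c = c2
    · simp [pvWalk, hrc]
    · by_cases hr : r = r2
      · -- vertical axis exhausted: one horizontal step
        have hc : c ≠ c2 := fun he => hrc ⟨hr, he⟩
        subst hr
        rw [pvWalk, if_neg hrc, if_neg (by simp [hc]), ih _ _ (by split <;> omega)]
        simp only [sub_self, Int.natAbs_zero, List.replicate_zero, List.nil_append]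
        by_cases hgt : c2 > c
        · simp only [if_pos hgt]
          rw [show (c2 - c).natAbs = (c2 - (c + 1)).natAbs + 1 by omega, List.replicate_succ,
            replicate_congr_char (c2 - (c + 1)).natAbs (if c2 > c + 1 then '>' else '<') '>'
              (fun hm => if_pos (by omega))]
        · simp only [if_neg hgt]
          rw [show (c2 - c).natAbs = (c2 - (c - 1)).natAbs + 1 by omega, List.replicate_succ,
            replicate_congr_char (c2 - (c - 1)).natAbs (if c2 > c - 1 then '>' else '<') '<'
              (fun hm => if_neg (by omega))]
      · -- one vertical step
        rw [pvWalk, if_neg hrc, if_pos (Or.inl ⟨rfl, hr⟩), ih _ _ (by split <;> omega)]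
        by_cases hlt : r2 < r
        · simp only [if_neg (show ¬ r2 > r by omega), if_pos hlt]
          rw [show (r2 - r).natAbs = (r2 - (r - 1)).natAbs + 1 by omega, List.replicate_succ,
            List.cons_append,
            replicate_congr_char (r2 - (r - 1)).natAbs (if r2 < r - 1 then '^' else 'v') '^'
              (fun hm => if_pos (by omega))]
        · simp only [if_pos (show r2 > r by omega), if_neg hlt]
          rw [show (r2 - r).natAbs = (r2 - (r + 1)).natAbs + 1 by omega, List.replicate_succ,
            List.cons_append,
            replicate_congr_char (r2 - (r + 1)).natAbs (if r2 < r + 1 then '^' else 'v') 'v'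
              (fun hm => if_neg (by omega))]

theorem pvWalk_false_eq (r2 c2 : Int) : ∀ (fuel : ℕ) (r c : Int),
    (r2 - r).natAbs + (c2 - c).natAbs ≤ fuel →
    pvWalk r2 c2 false fuel r c =
      List.replicate (c2 - c).natAbs (if c2 > c then '>' else '<') ++
      List.replicate (r2 - r).natAbs (if r2 < r then '^' else 'v') := by
  intro fuel
  induction fuel with
  | zero =>
    intro r c h
    have h1 : (r2 - r).natAbs = 0 := by omega
    have h2 : (c2 - c).natAbs = 0 := by omega
    simp [pvWalk, h1, h2]
  | succ k ih =>
    intro r c h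
    by_cases hrc : r = r2 ∧ c = c2
    · simp [pvWalk, hrc]
    · by_cases hc : c = c2
      · -- horizontal axis exhausted: one vertical step
        have hr : r ≠ r2 := fun he => hrc ⟨he, hc⟩
        subst hc
        rw [pvWalk, if_neg hrc, if_pos (Or.inr ⟨rfl, rfl⟩), ih _ _ (by split <;> omega)]
        simp only [sub_self, Int.natAbs_zero, List.replicate_zero, List.nil_append]
        by_cases hlt : r2 < r
        · simp only [if_pos hlt, if_neg (show ¬ r2 > r by omega)]
          rw [show (r2 - r).natAbs = (r2 - (r - 1)).natAbs + 1 by omega, List.replicate_succ,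
            replicate_congr_char (r2 - (r - 1)).natAbs (if r2 < r - 1 then '^' else 'v') '^'
              (fun hm => if_pos (by omega))]
        · simp only [if_neg hlt, if_pos (show r2 > r by omega)]
          rw [show (r2 - r).natAbs = (r2 - (r + 1)).natAbs + 1 by omega, List.replicate_succ,
            replicate_congr_char (r2 - (r + 1)).natAbs (if r2 < r + 1 then '^' else 'v') 'v'
              (fun hm => if_neg (by omega))]
      · -- one horizontal step
        rw [pvWalk, if_neg hrc, if_neg (by simp [hc]), ih _ _ (by split <;> omega)]
        by_cases hgt : c2 > c
        · simp only [if_pos hgt]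
          rw [show (c2 - c).natAbs = (c2 - (c + 1)).natAbs + 1 by omega, List.replicate_succ,
            List.cons_append,
            replicate_congr_char (c2 - (c + 1)).natAbs (if c2 > c + 1 then '>' else '<') '>'
              (fun hm => if_pos (by omega))]
        · simp only [if_neg hgt]
          rw [show (c2 - c).natAbs = (c2 - (c - 1)).natAbs + 1 by omega, List.replicate_succ,
            List.cons_append,
            replicate_congr_char (c2 - (c - 1)).natAbs (if c2 > c - 1 then '>' else '<') '<'
              (fun hm => if_neg (by omega))]

theorem ofList_replicate_ne (a b : Char) (n m : ℕ) (xs ys : List Char) (h : a ≠ b) :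
    String.ofList (List.replicate (n + 1) a ++ xs) ≠ String.ofList (List.replicate (m + 1) b ++ ys) := by
  intro he
  have := congrArg String.toList he
  simp [List.replicate_succ] at this
  exact h this.1

-- ===== VERDICT (by name: the statement is the Claim_ definition above) =====
theorem calc_directions_spec : Claim_equal_calc_directions := by
  intro i1 i2 keypad kl _ hpre
  unfold Spec_calc_directions calc_directions calc_directions_alt
  unfold Pre_calc_directions at hpre
  rcases h1 : List.lookup i1 kl with _ | ⟨row1, col1⟩ <;>
    rcases h2 : List.lookup i2 kl with _ | ⟨row2, col2⟩ <;>
      simp only [h1, h2, Option.elim] at hpre ⊢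
  rw [pvWalk_true_eq _ _ _ _ _ le_rfl, pvWalk_false_eq _ _ _ _ _ le_rfl]
  have hrn : (|row1 - row2|).toNat = (row2 - row1).natAbs := by
    rw [Int.abs_eq_natAbs, Int.toNat_natCast]; omega
  have hcn : (|col1 - col2|).toNat = (col2 - col1).natAbs := by
    rw [Int.abs_eq_natAbs, Int.toNat_natCast]; omega
  rcases lt_trichotomy col2 col1 with hc | hc | hc
  all_goals rcases lt_trichotomy row2 row1 with hr | hr | hr
  · -- NW: both axes nonzero
    obtain ⟨nr, hnr⟩ : ∃ k, (row2 - row1).natAbs = k + 1 := ⟨(row2 - row1).natAbs - 1, by omega⟩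
    obtain ⟨nc, hnc⟩ : ∃ k, (col2 - col1).natAbs = k + 1 := ⟨(col2 - col1).natAbs - 1, by omega⟩
    simp only [if_pos hr, if_neg hc.asymm, if_neg hc.ne, hnr, hnc]
    rw [if_neg (ofList_replicate_ne '^' '<' nr nc _ _ (by decide))]
    simp [pvStrTimesA, pvCellA, hrn, hcn, hnr, hnc, List.map_append,
      apply_ite (List.map (fun p : String => p ++ "A"))]
  · -- W: rows equal
    have h0 : (row2 - row1).natAbs = 0 := by omega
    have hnl : ¬ row2 < row1 := by omega
    have hng : ¬ row1 < row2 := by omega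
    simp only [h0, List.replicate_zero, List.nil_append, List.append_nil,
      if_neg hc.ne, if_neg hc.asymm, if_neg hnl, if_neg hng]
    simp [pvStrTimesA, hcn]
  · -- SW: both axes nonzero
    obtain ⟨nr, hnr⟩ : ∃ k, (row2 - row1).natAbs = k + 1 := ⟨(row2 - row1).natAbs - 1, by omega⟩
    obtain ⟨nc, hnc⟩ : ∃ k, (col2 - col1).natAbs = k + 1 := ⟨(col2 - col1).natAbs - 1, by omega⟩
    simp only [if_pos hr, if_neg hr.asymm, if_neg hc.asymm, if_neg hc.ne, hnr, hnc]
    rw [if_neg (ofList_replicate_ne 'v' '<' nr nc _ _ (by decide))]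
    simp [pvStrTimesA, pvCellA, hrn, hcn, hnr, hnc, List.map_append,
      apply_ite (List.map (fun p : String => p ++ "A"))]
  · -- N: cols equal
    have h0 : (col2 - col1).natAbs = 0 := by omega
    simp only [h0, List.replicate_zero, List.nil_append, List.append_nil,
      if_pos hc, if_pos hr]
    simp [pvStrTimesA, hrn]
  · -- stay
    have h0 : (row2 - row1).natAbs = 0 := by omega
    have h0' : (col2 - col1).natAbs = 0 := by omega
    have hnl : ¬ row2 < row1 := by omega
    have hng : ¬ row1 < row2 := by omega
    simp only [h0, h0', List.replicate_zero, List.nil_append, if_pos hc,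
      if_neg hnl, if_neg hng]
    simp
  · -- S: cols equal
    have h0 : (col2 - col1).natAbs = 0 := by omega
    simp only [h0, List.replicate_zero, List.nil_append, List.append_nil,
      if_pos hc, if_neg hr.asymm, if_pos hr]
    simp [pvStrTimesA, hrn]
  · -- NE: both axes nonzero
    obtain ⟨nr, hnr⟩ : ∃ k, (row2 - row1).natAbs = k + 1 := ⟨(row2 - row1).natAbs - 1, by omega⟩
    obtain ⟨nc, hnc⟩ : ∃ k, (col2 - col1).natAbs = k + 1 := ⟨(col2 - col1).natAbs - 1, by omega⟩
    simp only [if_pos hr, if_pos hc, if_neg hc.ne', hnr, hnc]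
    rw [if_neg (ofList_replicate_ne '^' '>' nr nc _ _ (by decide))]
    simp [pvStrTimesA, pvCellA, hrn, hcn, hnr, hnc, List.map_append,
      apply_ite (List.map (fun p : String => p ++ "A"))]
  · -- E: rows equal
    have h0 : (row2 - row1).natAbs = 0 := by omega
    have hnl : ¬ row2 < row1 := by omega
    have hng : ¬ row1 < row2 := by omega
    simp only [h0, List.replicate_zero, List.nil_append, List.append_nil,
      if_neg hc.ne', if_pos hc, if_neg hnl, if_neg hng]
    simp [pvStrTimesA, hcn]
  · -- SE: both axes nonzero
    obtain ⟨nr, hnr⟩ : ∃ k, (row2 - row1).natAbs = k + 1 := ⟨(row2 - row1).natAbs - 1, by omega⟩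
    obtain ⟨nc, hnc⟩ : ∃ k, (col2 - col1).natAbs = k + 1 := ⟨(col2 - col1).natAbs - 1, by omega⟩
    simp only [if_pos hr, if_neg hr.asymm, if_pos hc, if_neg hc.ne', hnr, hnc]
    rw [if_neg (ofList_replicate_ne 'v' '>' nr nc _ _ (by decide))]
    simp [pvStrTimesA, pvCellA, hrn, hcn, hnr, hnc, List.map_append,
      apply_ite (List.map (fun p : String => p ++ "A"))]
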